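-- pv_equiv track=rewrite | github.com/jesliwang/ProjectEuler | 191/main.py | GetPrizeCount
-- ===== SOURCE A (Python) =====
-- def GetPrizeCount(n):
--     start = [[1,1,0 ],[1,0,0]]
--     for i in range(1, n):
--         nt = [[0,0,0],[0,0,0]]
--         nt[0][0]=start[0][0]+start[0][1]+start[0][2]
--         nt[0][1]=start[0][0]
--         nt[0][2]=start[0][1]
--         nt[1][0]=start[0][0]+start[0][1]+start[0][2]+start[1][0]+start[1][1]+start[1][2]
--         nt[1][1]=start[1][0]
--         nt[1][2]=start[1][1]
--
--         start = nt
--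
--     return nt[0][0] + nt[0][1] + nt[0][2] + nt[1][0] + nt[1][1] + nt[1][2]
-- ===== SOURCE B (Python) =====
-- # Kitamasa: x^(n-1) mod p(x), p = (x^3-x^2-x-1)^2, evaluated against the first
-- # six sums of the six-state system; O(log n) multiplications instead of A's O(n) loop.
--
-- def _conv(a, b):
--     a0, a1, a2, a3, a4, a5 = a
--     b0, b1, b2, b3, b4, b5 = b
--     c0 = a0*b0
--     c1 = a0*b1 + a1*b0
--     c2 = a0*b2 + a1*b1 + a2*b0
--     c3 = a0*b3 + a1*b2 + a2*b1 + a3*b0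
--     c4 = a0*b4 + a1*b3 + a2*b2 + a3*b1 + a4*b0
--     c5 = a0*b5 + a1*b4 + a2*b3 + a3*b2 + a4*b1 + a5*b0
--     c6 = a1*b5 + a2*b4 + a3*b3 + a4*b2 + a5*b1
--     c7 = a2*b5 + a3*b4 + a4*b3 + a5*b2
--     c8 = a3*b5 + a4*b4 + a5*b3
--     c9 = a4*b5 + a5*b4
--     c10 = a5*b5
--     return (c0, c1, c2, c3, c4, c5, c6, c7, c8, c9, c10)
--
-- def _reduce(c):
--     # x^k = 2x^(k-1) + x^(k-2) - 3x^(k-4) - 2x^(k-5) - x^(k-6)  (mod p)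
--     c0, c1, c2, c3, c4, c5, c6, c7, c8, c9, c10 = c
--     c9 += 2*c10; c8 += c10; c6 -= 3*c10; c5 -= 2*c10; c4 -= c10
--     c8 += 2*c9;  c7 += c9;  c5 -= 3*c9;  c4 -= 2*c9;  c3 -= c9
--     c7 += 2*c8;  c6 += c8;  c4 -= 3*c8;  c3 -= 2*c8;  c2 -= c8
--     c6 += 2*c7;  c5 += c7;  c3 -= 3*c7;  c2 -= 2*c7;  c1 -= c7
--     c5 += 2*c6;  c4 += c6;  c2 -= 3*c6;  c1 -= 2*c6;  c0 -= c6
--     return (c0, c1, c2, c3, c4, c5)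
--
-- def _mulmod(a, b):
--     return _reduce(_conv(a, b))
--
-- def GetPrizeCount(n):
--     m = n - 1
--     r = (1, 0, 0, 0, 0, 0)      # x^0
--     b = (0, 1, 0, 0, 0, 0)      # x
--     while m:
--         if m & 1:
--             r = _mulmod(r, b)
--         b = _mulmod(b, b)
--         m >>= 1
--     g = (3, 8, 19, 43, 94, 200)  # the first six sums of the six-state system
--     return sum(x * y for x, y in zip(r, g))
-- ===== Notes on version B (the rewrite author's own statement) =====
-- stated objective: faster
-- what changed: Replaced A's linear iteration of the six-state system by Kitamasa-style modular polynomial exponentiation: compute x^(n-1) modulo the annihilating polynomial (x^3-x^2-x-1)^2 by repeated squaring and evaluate the six coefficients against the precomputed first six state sums.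
-- outside the precondition, e.g. on GetPrizeCount(1): A raises NameError, B returns 3
import Mathlib
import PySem

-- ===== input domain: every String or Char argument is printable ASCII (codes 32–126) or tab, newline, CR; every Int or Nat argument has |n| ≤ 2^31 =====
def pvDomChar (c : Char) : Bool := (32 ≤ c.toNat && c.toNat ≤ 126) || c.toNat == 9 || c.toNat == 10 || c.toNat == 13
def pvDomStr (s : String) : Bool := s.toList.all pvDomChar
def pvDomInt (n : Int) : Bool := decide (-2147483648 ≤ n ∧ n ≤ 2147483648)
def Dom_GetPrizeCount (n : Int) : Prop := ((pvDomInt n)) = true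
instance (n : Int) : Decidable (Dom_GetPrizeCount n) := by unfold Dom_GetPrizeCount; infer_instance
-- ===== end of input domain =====

-- B replaces A's linear six-state iteration by Kitamasa polynomial exponentiation
-- (x^(n-1) mod the annihilating polynomial, O(log n) multiplications); return values agree on n ≥ 2.

-- ===== PORT A =====
-- A's list-of-lists state (two rows of three), as a six-field structure (all indices in A are constants)
structure St6 where
  a : Int
  b : Int
  c : Int
  d : Int
  e : Int
  f : Int
deriving Repr, DecidableEq

-- one iteration of A's loop body (the nine constant-index assignments)
def stepA (s : St6) : St6 :=
  ⟨s.a + s.b + s.c, s.a, s.b, s.a + s.b + s.c + s.d + s.e + s.f, s.d, s.e⟩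

def initA : St6 := ⟨1, 1, 0, 1, 0, 0⟩

def sumSt (s : St6) : Int := s.a + s.b + s.c + s.d + s.e + s.f

-- for i in range(1, n): n-1 iterations; the final sum of all six entries
def GetPrizeCount (n : Int) : Int := sumSt (stepA^[(n - 1).toNat] initA)

-- ===== PORT B =====
-- low-degree polynomials as six-tuples (Source B's tuples), full products as eleven-tuples
def P6 : Type := Int × Int × Int × Int × Int × Int
def C11 : Type := Int × Int × Int × Int × Int × Int × Int × Int × Int × Int × Int

-- Source B _conv: the eleven convolution coefficients, written out exactly as in Source B
def conv (a b : P6) : C11 :=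
  let (a0, a1, a2, a3, a4, a5) := a
  let (b0, b1, b2, b3, b4, b5) := b
  (a0*b0,
   a0*b1 + a1*b0,
   a0*b2 + a1*b1 + a2*b0,
   a0*b3 + a1*b2 + a2*b1 + a3*b0,
   a0*b4 + a1*b3 + a2*b2 + a3*b1 + a4*b0,
   a0*b5 + a1*b4 + a2*b3 + a3*b2 + a4*b1 + a5*b0,
   a1*b5 + a2*b4 + a3*b3 + a4*b2 + a5*b1,
   a2*b5 + a3*b4 + a4*b3 + a5*b2,
   a3*b5 + a4*b4 + a5*b3,
   a4*b5 + a5*b4,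
   a5*b5)

-- Source B _reduce: the five cascaded reduction steps, as sequential lets
def reduceP (c : C11) : P6 :=
  let (c0, c1, c2, c3, c4, c5, c6, c7, c8, c9, c10) := c
  let c9 := c9 + 2*c10; let c8 := c8 + c10; let c6 := c6 - 3*c10; let c5 := c5 - 2*c10; let c4 := c4 - c10
  let c8 := c8 + 2*c9;  let c7 := c7 + c9;  let c5 := c5 - 3*c9;  let c4 := c4 - 2*c9;  let c3 := c3 - c9
  let c7 := c7 + 2*c8;  let c6 := c6 + c8;  let c4 := c4 - 3*c8;  let c3 := c3 - 2*c8;  let c2 := c2 - c8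
  let c6 := c6 + 2*c7;  let c5 := c5 + c7;  let c3 := c3 - 3*c7;  let c2 := c2 - 2*c7;  let c1 := c1 - c7
  let c5 := c5 + 2*c6;  let c4 := c4 + c6;  let c2 := c2 - 3*c6;  let c1 := c1 - 2*c6;  let c0 := c0 - c6
  (c0, c1, c2, c3, c4, c5)

def mulmod (a b : P6) : P6 := reduceP (conv a b)

-- Source B's while-loop binary exponentiation (m & 1 test, b squared each round, m >>= 1)
def powLoop (r b : P6) (m : Nat) : P6 :=
  if h : m = 0 then r
  else powLoop (if m % 2 = 1 then mulmod r b else r) (mulmod b b) (m / 2)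
termination_by m
decreasing_by exact Nat.div_lt_self (Nat.pos_of_ne_zero h) one_lt_two

-- Source B GetPrizeCount: r = x^(n-1) mod p; final sum(x*y for x,y in zip(r, g)) written out
def GetPrizeCount_alt (n : Int) : Int :=
  let m := (n - 1).toNat
  let r := powLoop (1, 0, 0, 0, 0, 0) (0, 1, 0, 0, 0, 0) m
  r.1*3 + r.2.1*8 + r.2.2.1*19 + r.2.2.2.1*43 + r.2.2.2.2.1*94 + r.2.2.2.2.2*200

-- ===== PRECONDITION & SPEC =====
-- A raises NameError below two (its loop body never runs, so nt is unbound at the return)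
def Pre_GetPrizeCount (n : Int) : Prop := 2 ≤ n
instance (n : Int) : Decidable (Pre_GetPrizeCount n) := by unfold Pre_GetPrizeCount; infer_instance
def pvWitness_GetPrizeCount : Int := 5

def Spec_GetPrizeCount (n : Int) (out : Int) : Prop := out = GetPrizeCount_alt n
instance (n : Int) (out : Int) : Decidable (Spec_GetPrizeCount n out) := by unfold Spec_GetPrizeCount; infer_instance

-- ===== CLAIM (what is proved, stated in full; the proofs are below) =====
def Claim_equal_GetPrizeCount : Prop := ∀ (n : Int), Dom_GetPrizeCount n → Pre_GetPrizeCount n → Spec_GetPrizeCount n (GetPrizeCount n)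

-- ===== LEMMAS AND PROOFS =====

-- the sequence of six-state sums that A iterates
def g (k : Nat) : Int := sumSt (stepA^[k] initA)

theorem it_succ (k : Nat) : stepA^[k + 1] initA = stepA (stepA^[k] initA) :=
  Function.iterate_succ_apply' stepA k initA

-- g is annihilated by p(x) = (x^3 - x^2 - x - 1)^2
theorem grec (k : Nat) :
    g (k + 6) = 2 * g (k + 5) + g (k + 4) - 3 * g (k + 2) - 2 * g (k + 1) - g k := by
  simp only [g, show k + 6 = (k + 5) + 1 from rfl, it_succ,
    show k + 5 = (k + 4) + 1 from rfl, show k + 4 = (k + 3) + 1 from rfl,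
    show k + 3 = (k + 2) + 1 from rfl, show k + 2 = (k + 1) + 1 from rfl,
    show k + 1 = k + 1 from rfl]
  generalize stepA^[k] initA = v
  obtain ⟨a, b, c, d, e, f⟩ := v
  simp only [stepA, sumSt]
  ring

-- evaluate a six-coefficient polynomial against the shifted sequence g
def Phi (c : P6) (k : Nat) : Int :=
  c.1 * g k + c.2.1 * g (k + 1) + c.2.2.1 * g (k + 2) + c.2.2.2.1 * g (k + 3) +
    c.2.2.2.2.1 * g (k + 4) + c.2.2.2.2.2 * g (k + 5)

-- "c represents x^s modulo p"
def RelP (c : P6) (s : Nat) : Prop := ∀ k, Phi c k = g (s + k)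

theorem rel_one : RelP (1, 0, 0, 0, 0, 0) 0 := by
  intro k; simp [Phi]

theorem rel_x : RelP (0, 1, 0, 0, 0, 0) 1 := by
  intro k; simp [Phi, Nat.add_comm]

-- the reduction cascade preserves the value against g
theorem red (c0 c1 c2 c3 c4 c5 c6 c7 c8 c9 c10 : Int) (k : Nat) :
    Phi (reduceP (c0, c1, c2, c3, c4, c5, c6, c7, c8, c9, c10)) k =
      c0 * g k + c1 * g (k + 1) + c2 * g (k + 2) + c3 * g (k + 3) + c4 * g (k + 4) +
        c5 * g (k + 5) + c6 * g (k + 6) + c7 * g (k + 7) + c8 * g (k + 8) +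
        c9 * g (k + 9) + c10 * g (k + 10) := by
  have h6 := grec k
  have h7 := grec (k + 1)
  have h8 := grec (k + 2)
  have h9 := grec (k + 3)
  have h10 := grec (k + 4)
  simp only [Nat.add_assoc, Nat.reduceAdd] at h6 h7 h8 h9 h10
  rw [h10, h9, h8, h7, h6]
  simp only [reduceP, Phi]
  ring

theorem rel_mul {a b : P6} {s t : Nat} (ha : RelP a s) (hb : RelP b t) :
    RelP (mulmod a b) (s + t) := by
  intro k
  obtain ⟨a0, a1, a2, a3, a4, a5⟩ := a
  obtain ⟨b0, b1, b2, b3, b4, b5⟩ := b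
  have A0 := ha k
  have A1 := ha (k + 1)
  have A2 := ha (k + 2)
  have A3 := ha (k + 3)
  have A4 := ha (k + 4)
  have A5 := ha (k + 5)
  have B := hb (s + k)
  simp only [Phi, Nat.add_assoc, Nat.reduceAdd] at A0 A1 A2 A3 A4 A5 B
  rw [show s + (k + 1) = s + k + 1 from by omega] at A1
  rw [show s + (k + 2) = s + k + 2 from by omega] at A2
  rw [show s + (k + 3) = s + k + 3 from by omega] at A3
  rw [show s + (k + 4) = s + k + 4 from by omega] at A4
  rw [show s + (k + 5) = s + k + 5 from by omega] at A5
  rw [show t + (s + k) = s + t + k from by omega] at B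
  rw [mulmod, show conv (a0, a1, a2, a3, a4, a5) (b0, b1, b2, b3, b4, b5) =
      (a0*b0,
       a0*b1 + a1*b0,
       a0*b2 + a1*b1 + a2*b0,
       a0*b3 + a1*b2 + a2*b1 + a3*b0,
       a0*b4 + a1*b3 + a2*b2 + a3*b1 + a4*b0,
       a0*b5 + a1*b4 + a2*b3 + a3*b2 + a4*b1 + a5*b0,
       a1*b5 + a2*b4 + a3*b3 + a4*b2 + a5*b1,
       a2*b5 + a3*b4 + a4*b3 + a5*b2,
       a3*b5 + a4*b4 + a5*b3,
       a4*b5 + a5*b4,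
       a5*b5) from rfl, red]
  linear_combination b0 * A0 + b1 * A1 + b2 * A2 + b3 * A3 + b4 * A4 + b5 * A5 + B

theorem powLoop_rel : ∀ (m : Nat) (r b : P6) (s t : Nat),
    RelP r s → RelP b t → RelP (powLoop r b m) (s + m * t) := by
  intro m
  induction m using Nat.strong_induction_on with
  | _ m ih =>
    intro r b s t hr hb
    by_cases h : m = 0
    · subst h; simpa [powLoop] using hr
    · rw [powLoop, dif_neg h]
      have hb2 : RelP (mulmod b b) (t + t) := rel_mul hb hb
      have hlt : m / 2 < m := Nat.div_lt_self (Nat.pos_of_ne_zero h) one_lt_two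
      by_cases hp : m % 2 = 1
      · rw [if_pos hp]
        have := ih (m / 2) hlt (mulmod r b) (mulmod b b) (s + t) (t + t) (rel_mul hr hb) hb2
        have e : s + t + m / 2 * (t + t) = s + m * t := by
          conv_rhs => rw [← Nat.div_add_mod m 2, hp]
          ring
        rwa [e] at this
      · rw [if_neg hp]
        have := ih (m / 2) hlt r (mulmod b b) s (t + t) hr hb2
        have hm0 : m % 2 = 0 := by omega
        have e : s + m / 2 * (t + t) = s + m * t := by
          conv_rhs => rw [← Nat.div_add_mod m 2, hm0]
          ring
        rwa [e] at this

theorem g_small : g 0 = 3 ∧ g 1 = 8 ∧ g 2 = 19 ∧ g 3 = 43 ∧ g 4 = 94 ∧ g 5 = 200 := by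
  decide

-- ===== VERDICT (by name: the statement is the Claim_ definition above) =====
theorem GetPrizeCount_spec : Claim_equal_GetPrizeCount := by
  unfold Claim_equal_GetPrizeCount
  intro n _ _
  unfold Spec_GetPrizeCount
  have hrel := powLoop_rel ((n - 1).toNat) (1, 0, 0, 0, 0, 0) (0, 1, 0, 0, 0, 0) 0 1 rel_one rel_x
  rw [show (0 : Nat) + (n - 1).toNat * 1 = (n - 1).toNat from by omega] at hrel
  have h := hrel 0
  rw [Nat.add_zero] at h
  obtain ⟨g0, g1, g2, g3, g4, g5⟩ := g_small
  rw [show GetPrizeCount n = g ((n - 1).toNat) from rfl, ← h]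
  unfold GetPrizeCount_alt Phi
  simp only [Nat.zero_add, Nat.reduceAdd, g0, g1, g2, g3, g4, g5]
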